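-- pv_equiv track=rewrite | github.com/BrianMH/Dev_Learning | mit101/image_processing_2/lab.py | getAdjacentEnergies
-- ===== SOURCE A (Python) =====
-- def getAdjacentEnergies(aboveRowVals, colInd):
--     '''
--     Given a column index and the values above the row in question, returns a list
--     representing all of the adjacent pixels from the row above (or at least any
--     that exist as edges only have 2 adjacent above pixels) along with their column
--     indices
--     '''
--     tReturn = []
--     tIndices = []
--     for offset in (-1, 0, 1):
--         if offset+colInd < 0 or offset+colInd >= len(aboveRowVals):
--             continue
--
--         tReturn.append(aboveRowVals[offset+colInd])
--         tIndices.append(offset+colInd)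
--     return tReturn, tIndices
-- ===== SOURCE B (Python) =====
-- def getAdjacentEnergies(aboveRowVals, colInd):
--     '''
--     Given a column index and the values above the row in question, returns a list
--     representing all of the adjacent pixels from the row above along with their
--     column indices, computed as one clamped contiguous window.
--     '''
--     n = len(aboveRowVals)
--     start = min(n, max(0, colInd - 1))
--     stop = max(0, min(n, colInd + 2))
--     return list(aboveRowVals[start:stop]), list(range(start, stop))
-- ===== Notes on version B (the rewrite author's own statement) =====
-- stated objective: simpler
-- what changed: Replaces the per-offset loop with per-element bounds tests by arithmetic clamping: compute the contiguous window [max(0,colInd-1), min(len,colInd+2)) (clamped into [0,len]) and return one slice plus one range.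
import Mathlib
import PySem

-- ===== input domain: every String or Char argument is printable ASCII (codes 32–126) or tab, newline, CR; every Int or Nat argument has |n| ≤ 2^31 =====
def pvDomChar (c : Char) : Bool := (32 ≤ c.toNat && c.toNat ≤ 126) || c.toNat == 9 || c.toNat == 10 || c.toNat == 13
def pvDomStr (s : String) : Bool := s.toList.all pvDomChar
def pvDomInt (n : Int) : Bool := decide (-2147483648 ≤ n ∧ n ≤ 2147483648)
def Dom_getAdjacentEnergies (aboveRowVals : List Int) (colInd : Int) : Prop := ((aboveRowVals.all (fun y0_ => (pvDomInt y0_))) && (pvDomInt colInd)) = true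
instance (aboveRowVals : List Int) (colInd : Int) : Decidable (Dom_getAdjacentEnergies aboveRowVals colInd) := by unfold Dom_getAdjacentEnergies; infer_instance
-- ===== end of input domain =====

-- B replaces A's per-offset loop with bounds tests by one clamped window: a slice plus a range (objective: simpler).

-- ===== PORT A =====
-- literal port of A: fold over the offsets (-1, 0, 1), skipping out-of-range
-- indices; the index into aboveRowVals is guarded to be in range, so pyGetD
-- with default 0 is exact here (the default is never used).
def getAdjacentEnergies (aboveRowVals : List Int) (colInd : Int) : List Int × List Int :=
  [(-1 : Int), 0, 1].foldl
    (fun st offset =>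
      if offset + colInd < 0 ∨ (aboveRowVals.length : Int) ≤ offset + colInd then st
      else (st.1 ++ [PySem.List.pyGetD aboveRowVals (offset + colInd) 0],
            st.2 ++ [offset + colInd]))
    ([], [])

-- ===== PORT B =====
def getAdjacentEnergies_alt (aboveRowVals : List Int) (colInd : Int) : List Int × List Int :=
  let n : Int := aboveRowVals.length
  let start := min n (max 0 (colInd - 1))
  let stop := max 0 (min n (colInd + 2))
  (PySem.List.slice aboveRowVals (some start) (some stop), PySem.List.pyRange start stop)

-- ===== PRECONDITION & SPEC =====
def Spec_getAdjacentEnergies (aboveRowVals : List Int) (colInd : Int) (out : List Int × List Int) : Prop := out = getAdjacentEnergies_alt aboveRowVals colInd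
instance (aboveRowVals : List Int) (colInd : Int) (out : List Int × List Int) : Decidable (Spec_getAdjacentEnergies aboveRowVals colInd out) := by unfold Spec_getAdjacentEnergies; infer_instance

-- ===== CLAIM (what is proved, stated in full; the proofs are below) =====
def Claim_equal_getAdjacentEnergies : Prop := ∀ (aboveRowVals : List Int) (colInd : Int), Dom_getAdjacentEnergies aboveRowVals colInd → Spec_getAdjacentEnergies aboveRowVals colInd (getAdjacentEnergies aboveRowVals colInd)

-- ===== LEMMAS AND PROOFS =====

-- a slice with in-bounds nonnegative endpoints is the map of indexing over the index range
lemma slice_eq_map_pyRange (xs : List Int) (a b : Int) (h0 : 0 ≤ a) (h0b : 0 ≤ b) (hb : b ≤ (xs.length : Int)) :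
    PySem.List.slice xs (some a) (some b)
      = (PySem.List.pyRange a b).map (fun i => PySem.List.pyGetD xs i 0) := by
  by_cases hba : b ≤ a
  · rw [PySem.List.slice_toNat xs h0 h0b, PySem.List.pyRange_one_eq_nil hba]
    have h : b.toNat - a.toNat = 0 := by omega
    simp [h]
  · have key : ∀ (k : Nat) (a : Int), 0 ≤ a → a + k = b →
        PySem.List.slice xs (some a) (some b)
          = (PySem.List.pyRange a b).map (fun i => PySem.List.pyGetD xs i 0) := by
      intro k
      induction k with
      | zero =>
        intro a ha hk
        rw [PySem.List.slice_toNat xs ha h0b, PySem.List.pyRange_one_eq_nil (by omega)]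
        have h : b.toNat - a.toNat = 0 := by omega
        simp [h]
      | succ m ih =>
        intro a ha hk
        have hlt : a < b := by omega
        have hna : a.toNat < xs.length := by omega
        rw [PySem.List.pyRange_one_cons hlt, List.map_cons, ← ih (a + 1) (by omega) (by omega),
            PySem.List.slice_toNat xs ha h0b, PySem.List.slice_toNat xs (by omega) h0b,
            List.drop_eq_getElem_cons hna]
        have h1 : b.toNat - a.toNat = (b.toNat - (a + 1).toNat) + 1 := by omega
        have h2 : (a + 1).toNat = a.toNat + 1 := by omega
        rw [h1, h2, List.take_succ_cons, PySem.List.pyGetD_eq_getElem xs 0 ha (by omega)]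
    exact key (b - a).toNat a h0 (by omega)

lemma pyRange3 (c : Int) : PySem.List.pyRange (c - 1) (c + 2) = [c - 1, c, c + 1] := by
  rw [PySem.List.pyRange_one_cons (by omega), PySem.List.pyRange_one_cons (by omega),
      PySem.List.pyRange_one_cons (by omega), PySem.List.pyRange_one_eq_nil (by omega)]
  norm_num

lemma pyRange2l (c : Int) : PySem.List.pyRange (c - 1) (c + 1) = [c - 1, c] := by
  rw [PySem.List.pyRange_one_cons (by omega), PySem.List.pyRange_one_cons (by omega),
      PySem.List.pyRange_one_eq_nil (by omega)]
  norm_num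

lemma pyRange2r (c : Int) : PySem.List.pyRange c (c + 2) = [c, c + 1] := by
  rw [PySem.List.pyRange_one_cons (by omega), PySem.List.pyRange_one_cons (by omega),
      PySem.List.pyRange_one_eq_nil (by omega)]

lemma pyRange1l (c : Int) : PySem.List.pyRange (c - 1) c = [c - 1] := by
  rw [PySem.List.pyRange_one_cons (by omega), PySem.List.pyRange_one_eq_nil (by omega)]

lemma pyRange1m (c : Int) : PySem.List.pyRange c (c + 1) = [c] := by
  rw [PySem.List.pyRange_one_cons (by omega), PySem.List.pyRange_one_eq_nil (by omega)]

lemma pyRange1r (c : Int) : PySem.List.pyRange (c + 1) (c + 2) = [c + 1] := by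
  rw [PySem.List.pyRange_one_cons (by omega), PySem.List.pyRange_one_eq_nil (by omega)]

lemma getAdjacentEnergies_eq_alt (xs : List Int) (c : Int) :
    getAdjacentEnergies xs c = getAdjacentEnergies_alt xs c := by
  have hn : (0 : Int) ≤ (xs.length : Int) := by positivity
  unfold getAdjacentEnergies getAdjacentEnergies_alt
  simp only [List.foldl]
  rw [slice_eq_map_pyRange xs _ _ (by omega) (by omega) (by omega)]
  rw [show (-1 : Int) + c = c - 1 from by ring, show (0 : Int) + c = c from by ring,
      show (1 : Int) + c = c + 1 from by ring]
  set n : Int := (xs.length : Int) with hdefn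
  split_ifs with hA hB hC hC hB hC hC <;>
  first
    | omega
    | (rw [show min n (max 0 (c - 1)) = c - 1 from by omega,
           show max 0 (min n (c + 2)) = c + 2 from by omega, pyRange3]
       simp)
    | (rw [show min n (max 0 (c - 1)) = c - 1 from by omega,
           show max 0 (min n (c + 2)) = c + 1 from by omega, pyRange2l]
       simp)
    | (rw [show min n (max 0 (c - 1)) = c - 1 from by omega,
           show max 0 (min n (c + 2)) = c from by omega, pyRange1l]
       simp)
    | (rw [show min n (max 0 (c - 1)) = c from by omega,
           show max 0 (min n (c + 2)) = c + 2 from by omega, pyRange2r]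
       simp)
    | (rw [show min n (max 0 (c - 1)) = c from by omega,
           show max 0 (min n (c + 2)) = c + 1 from by omega, pyRange1m]
       simp)
    | (rw [show min n (max 0 (c - 1)) = c + 1 from by omega,
           show max 0 (min n (c + 2)) = c + 2 from by omega, pyRange1r]
       simp)
    | (rw [PySem.List.pyRange_one_eq_nil
             (show max 0 (min n (c + 2)) ≤ min n (max 0 (c - 1)) from by omega)]
       simp)

-- ===== VERDICT (by name: the statement is the Claim_ definition above) =====
theorem getAdjacentEnergies_spec : Claim_equal_getAdjacentEnergies := by
  intro xs c _
  unfold Spec_getAdjacentEnergies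
  exact getAdjacentEnergies_eq_alt xs c
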